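-- pv_equiv track=rewrite | github.com/Cerebras/modelzoo | src/cerebras/modelzoo/data_preparation/nlp/chunk_data_processing/data_reader.py | find_last_paragraph_or_sentence_end
-- ===== SOURCE A (Python) =====
-- def find_last_paragraph_or_sentence_end(buffer: str) -> int:
--     """
--     Find the last end of a paragraph (denoted by '\n\n') or a sentence in the buffer.
--
--     Args:
--         buffer (str): The text buffer.
--
--     Returns:
--         int: The position of the last end of the paragraph or sentence.
--     """
--     # Check for the end of a paragraph first
--     para_end_pos = buffer.rfind('\n\n')
--     if para_end_pos != -1:
--         return para_end_pos + 2
--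
--     # If no end of paragraph is found, check for the end of a sentence
--     sentence_endings = ['.', '!', '?']
--     for i in range(len(buffer) - 1, -1, -1):
--         if buffer[i] in sentence_endings:
--             return i + 1
--
--     return None
-- ===== SOURCE B (Python) =====
-- def find_last_paragraph_or_sentence_end(buffer: str) -> int:
--     """Single forward pass: track the last '\n\n' start and the last sentence ending."""
--     i, last_para, last_sent, prev = 0, -1, -1, None
--     for ch in buffer:
--         if prev == '\n' and ch == '\n':
--             last_para = i - 1
--         if ch == '.' or ch == '!' or ch == '?':
--             last_sent = i
--         i += 1
--         prev = ch
--     if last_para != -1: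
--         return last_para + 2
--     if last_sent != -1:
--         return last_sent + 1
--     return None
-- ===== Notes on version B (the rewrite author's own statement) =====
-- stated objective: alternative
-- what changed: A's rfind for the paragraph break plus a separate backward index loop for sentence endings are replaced by one forward pass over the characters that maintains the last paragraph-break position and the last sentence-ending position in accumulators.
import Mathlib
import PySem

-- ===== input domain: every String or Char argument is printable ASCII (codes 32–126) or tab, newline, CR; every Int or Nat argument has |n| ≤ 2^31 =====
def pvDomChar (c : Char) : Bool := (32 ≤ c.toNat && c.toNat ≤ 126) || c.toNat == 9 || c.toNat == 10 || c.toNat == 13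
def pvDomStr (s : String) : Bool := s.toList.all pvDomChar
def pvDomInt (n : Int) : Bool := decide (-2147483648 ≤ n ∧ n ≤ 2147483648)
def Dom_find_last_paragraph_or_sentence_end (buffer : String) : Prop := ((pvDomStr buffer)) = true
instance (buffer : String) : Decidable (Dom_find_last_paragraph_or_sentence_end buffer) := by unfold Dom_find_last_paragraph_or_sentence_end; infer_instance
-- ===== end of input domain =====

-- B replaces A's rfind + backward scan by one forward pass with accumulators (objective: alternative).

-- ===== PORT A =====
-- hand-written port of buffer.rfind(sub): tries start positions len(buffer) down to 0,
-- returns the first (= highest) where sub is a prefix of the rest, else -1; exact for any sub.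
def pvRfindAux (cs sub : List Char) : Nat → Int
  | 0 => -1
  | k+1 => if sub.isPrefixOf (cs.drop k) then (k : Int) else pvRfindAux cs sub k

-- A's backward loop 'for i in range(len(buffer)-1, -1, -1)'; the index is always in range,
-- so buffer[i] is ported as getD (exact here).
def pvSentLoop (cs : List Char) : Nat → Option Int
  | 0 => none
  | k+1 => if ['.', '!', '?'].contains (cs.getD k ' ') then some ((k : Int) + 1)
           else pvSentLoop cs k

def find_last_paragraph_or_sentence_end (buffer : String) : Option Int :=
  let cs := buffer.toList
  let para_end_pos := pvRfindAux cs ['\n', '\n'] (cs.length + 1)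
  if para_end_pos ≠ -1 then some (para_end_pos + 2)
  else pvSentLoop cs cs.length

-- ===== PORT B =====
-- state: (i, last_para, last_sent, prev)
def pvAltStep (st : Int × Int × Int × Option Char) (ch : Char) : Int × Int × Int × Option Char :=
  let (i, last_para, last_sent, _prev) := st
  let last_para := if st.2.2.2 = some '\n' ∧ ch = '\n' then i - 1 else last_para
  let last_sent := if ch = '.' ∨ ch = '!' ∨ ch = '?' then i else last_sent
  (i + 1, last_para, last_sent, some ch)

def find_last_paragraph_or_sentence_end_alt (buffer : String) : Option Int :=
  let st := buffer.toList.foldl pvAltStep (0, -1, -1, none)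
  if st.2.1 ≠ -1 then some (st.2.1 + 2)
  else if st.2.2.1 ≠ -1 then some (st.2.2.1 + 1)
  else none

-- ===== PRECONDITION & SPEC =====
def Spec_find_last_paragraph_or_sentence_end (buffer : String) (out : Option Int) : Prop := out = find_last_paragraph_or_sentence_end_alt buffer
instance (buffer : String) (out : Option Int) : Decidable (Spec_find_last_paragraph_or_sentence_end buffer out) := by unfold Spec_find_last_paragraph_or_sentence_end; infer_instance

-- ===== CLAIM (what is proved, stated in full; the proofs are below) =====
def Claim_equal_find_last_paragraph_or_sentence_end : Prop := ∀ (buffer : String), Dom_find_last_paragraph_or_sentence_end buffer → Spec_find_last_paragraph_or_sentence_end buffer (find_last_paragraph_or_sentence_end buffer)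

-- ===== LEMMAS AND PROOFS =====

theorem pvPrefix2_append (x y c : Char) (l : List Char) (h : 2 ≤ l.length) :
    ([x, y]).isPrefixOf (l ++ [c]) = ([x, y]).isPrefixOf l := by
  match l with
  | a :: b :: t => simp [List.isPrefixOf]

theorem pvRfind_agree (cs : List Char) (c : Char) :
    ∀ k, k + 1 ≤ cs.length →
      pvRfindAux (cs ++ [c]) ['\n', '\n'] k = pvRfindAux cs ['\n', '\n'] k := by
  intro k
  induction k with
  | zero => intro _; rfl
  | succ k ih =>
    intro hk
    have hd : (cs ++ [c]).drop k = cs.drop k ++ [c] := by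
      rw [List.drop_append_of_le_length (by omega)]
    have hlen : 2 ≤ (cs.drop k).length := by simp; omega
    simp only [pvRfindAux, hd, pvPrefix2_append _ _ _ _ hlen]
    split
    · rfl
    · exact ih (by omega)

theorem pvRfind_snoc (cs : List Char) (c : Char) :
    pvRfindAux (cs ++ [c]) ['\n', '\n'] (cs.length + 2) =
      if cs.getLast? = some '\n' ∧ c = '\n' then ((cs.length : Int) - 1)
      else pvRfindAux cs ['\n', '\n'] (cs.length + 1) := by
  rcases List.eq_nil_or_concat cs with rfl | ⟨t, b, rfl⟩
  · simp [pvRfindAux, List.isPrefixOf]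
  · have hL : (t ++ [b]).length = t.length + 1 := by simp
    have hassoc : t ++ [b] ++ [c] = t ++ [b, c] := by simp
    have d1 : (t ++ [b, c]).drop (t.length + 1) = [c] := by
      have := List.drop_append (l₁ := t) (l₂ := [b, c]) (i := 1)
      simpa using this
    have d2 : (t ++ [b, c]).drop t.length = [b, c] := by
      simpa using List.drop_append (l₁ := t) (l₂ := [b, c]) (i := 0)
    have d3 : (t ++ [b, c]).drop (t.length + 2) = [] := by
      have := List.drop_append (l₁ := t) (l₂ := [b, c]) (i := 2)
      simpa using this
    simp only [List.concat_eq_append] at *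
    rw [hL, hassoc]
    show pvRfindAux (t ++ [b, c]) ['\n', '\n'] (t.length + 3) = _
    simp only [pvRfindAux, d1, d2, d3]
    have hagree := pvRfind_agree (t ++ [b]) c t.length (by simp)
    rw [hassoc] at hagree
    -- RHS : pvRfindAux (t ++ [b]) nn (t.length + 2)
    have r1 : (t ++ [b]).drop (t.length + 1) = [] := by
      simpa using List.drop_append (l₁ := t) (l₂ := [b]) (i := 1)
    have r2 : (t ++ [b]).drop t.length = [b] := by
      simpa using List.drop_append (l₁ := t) (l₂ := [b]) (i := 0)
    by_cases hb : b = '\n' <;> by_cases hc : c = '\n'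
    · subst hb; subst hc
      simp [pvRfindAux, r1, r2, List.isPrefixOf]
    · subst hb
      have hc' : ('\n' = c) = False := by simp [Ne.symm hc]
      simp [pvRfindAux, r1, r2, List.isPrefixOf, hc, hc', hagree]
    · subst hc
      have hb' : ('\n' = b) = False := by simp [Ne.symm hb]
      simp [pvRfindAux, r1, r2, List.isPrefixOf, hb, hb', hagree]
    · have hc' : ('\n' = c) = False := by simp [Ne.symm hc]
      have hb' : ('\n' = b) = False := by simp [Ne.symm hb]
      simp [pvRfindAux, r1, r2, List.isPrefixOf, hb, hc, hb', hc', hagree]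

theorem pvSent_agree (cs : List Char) (c : Char) :
    ∀ k, k ≤ cs.length → pvSentLoop (cs ++ [c]) k = pvSentLoop cs k := by
  intro k
  induction k with
  | zero => intro _; rfl
  | succ k ih =>
    intro hk
    have hg : (cs ++ [c]).getD k ' ' = cs.getD k ' ' := by
      rw [List.getD_append _ _ _ _ (by omega)]
    simp only [pvSentLoop, hg]
    split
    · rfl
    · exact ih (by omega)

theorem pvSent_snoc (cs : List Char) (c : Char) :
    pvSentLoop (cs ++ [c]) (cs.length + 1) =
      if c = '.' ∨ c = '!' ∨ c = '?' then some ((cs.length : Int) + 1)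
      else pvSentLoop cs cs.length := by
  have hg : (cs ++ [c]).getD cs.length ' ' = c := by simp
  simp only [pvSentLoop, hg]
  by_cases h : c = '.' ∨ c = '!' ∨ c = '?'
  · have : (['.', '!', '?'].contains c) = true := by
      rcases h with h | h | h <;> simp [h]
    simp [this, h]
  · have hcontains : (['.', '!', '?'].contains c) = false := by
      simp; push_neg at h ⊢; tauto
    simp only [hcontains, Bool.false_eq_true, if_false, if_neg h]
    exact pvSent_agree cs c cs.length le_rfl

theorem pvMain (cs : List Char) :
    (cs.foldl pvAltStep (0, -1, -1, none)).1 = (cs.length : Int) ∧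
    (cs.foldl pvAltStep (0, -1, -1, none)).2.2.2 = cs.getLast? ∧
    (cs.foldl pvAltStep (0, -1, -1, none)).2.1 = pvRfindAux cs ['\n', '\n'] (cs.length + 1) ∧
    pvSentLoop cs cs.length =
      (if (cs.foldl pvAltStep (0, -1, -1, none)).2.2.1 = -1 then none
       else some ((cs.foldl pvAltStep (0, -1, -1, none)).2.2.1 + 1)) := by
  induction cs using List.reverseRecOn with
  | nil => simp [pvRfindAux, pvSentLoop, List.isPrefixOf]
  | append_singleton cs c ih =>
    obtain ⟨ih1, ih2, ih3, ih4⟩ := ih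
    have hfold : (cs ++ [c]).foldl pvAltStep (0, -1, -1, none) =
        pvAltStep (cs.foldl pvAltStep (0, -1, -1, none)) c := by
      simp
    refine ⟨?_, ?_, ?_, ?_⟩
    · simp [hfold, pvAltStep, ih1]
    · simp [hfold, pvAltStep]
    · rw [hfold]
      have hlen : (cs ++ [c]).length = cs.length + 1 := by simp
      rw [hlen]
      show pvAltStep _ c |>.2.1 = pvRfindAux (cs ++ [c]) ['\n', '\n'] (cs.length + 2)
      rw [pvRfind_snoc cs c]
      by_cases hp : cs.getLast? = some '\n' ∧ c = '\n'
      · simp [pvAltStep, ih2, hp, ih1]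
      · simp [pvAltStep, ih2, hp, ih3]
    · rw [hfold]
      have hlen : (cs ++ [c]).length = cs.length + 1 := by simp
      rw [hlen, pvSent_snoc cs c]
      by_cases h : c = '.' ∨ c = '!' ∨ c = '?'
      · have hne : ¬((cs.length : Int) = -1) := by omega
        simp [pvAltStep, h, ih1, hne]
      · simp [pvAltStep, h]
        exact ih4

-- ===== VERDICT (by name: the statement is the Claim_ definition above) =====
theorem find_last_paragraph_or_sentence_end_spec : Claim_equal_find_last_paragraph_or_sentence_end := by
  intro buffer _
  unfold Spec_find_last_paragraph_or_sentence_end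
  unfold find_last_paragraph_or_sentence_end find_last_paragraph_or_sentence_end_alt
  dsimp only []
  obtain ⟨_, _, h3, h4⟩ := pvMain buffer.toList
  rw [← h3]
  by_cases hpp : (buffer.toList.foldl pvAltStep (0, -1, -1, none)).2.1 = -1
  · simp only [hpp, ne_eq, not_true_eq_false, if_false]
    rw [h4]
    by_cases hs : (buffer.toList.foldl pvAltStep (0, -1, -1, none)).2.2.1 = -1 <;> simp [hs]
  · simp [hpp]
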